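-- pv_equiv track=rewrite | github.com/Curly-Mo/codejam | practice/all-your-base/all-your-base.py | toMinValue
-- ===== SOURCE A (Python) =====
-- def toMinValue(word,base):
-- 	symbols = "1023456789ABCDEFGHIJKLMNOPQRSTUVWXYZ"
-- 	value = ""
-- 	count=0
-- 	usedChars = {}
-- 	for char in word:
-- 		if char in usedChars:
-- 			value += usedChars[char]
-- 		else:
-- 			value += symbols[count]
-- 			usedChars[char] = symbols[count]
-- 			count += 1
-- 	return value
-- ===== SOURCE B (Python) =====
-- def toMinValue(word, base):
--     symbols = "1023456789ABCDEFGHIJKLMNOPQRSTUVWXYZ"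
--     return ''.join(symbols[len(set(word[:word.index(c)]))] for c in word)
-- ===== Notes on version B (the rewrite author's own statement) =====
-- stated objective: alternative
-- what changed: A builds a char->symbol dict incrementally while emitting; B keeps no state at all and computes each character's digit directly as symbols[len(set(word[:word.index(c)]))] - the count of distinct characters before its first occurrence - trading A's O(n) dict loop for a stateless O(n^2) per-character formula.
import Mathlib
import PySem

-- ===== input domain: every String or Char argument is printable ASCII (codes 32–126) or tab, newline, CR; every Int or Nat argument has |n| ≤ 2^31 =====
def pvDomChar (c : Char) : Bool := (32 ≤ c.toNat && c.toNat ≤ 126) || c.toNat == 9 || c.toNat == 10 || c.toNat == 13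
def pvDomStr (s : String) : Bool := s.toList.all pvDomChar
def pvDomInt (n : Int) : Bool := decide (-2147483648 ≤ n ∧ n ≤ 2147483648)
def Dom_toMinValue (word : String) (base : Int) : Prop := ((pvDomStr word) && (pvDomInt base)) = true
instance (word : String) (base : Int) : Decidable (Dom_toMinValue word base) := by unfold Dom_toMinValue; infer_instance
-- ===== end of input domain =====

-- B replaces A's incremental dict-building loop by a stateless per-character formula:
-- each character's digit index is the number of distinct characters in the prefix before
-- its first occurrence (objective: alternative — no shared state, but O(n^2) vs A's O(n)).


-- ===== PORT A =====
def pvSymbolsA : List Char := "1023456789ABCDEFGHIJKLMNOPQRSTUVWXYZ".toList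

-- A's loop: value, count, usedChars threaded through the word's characters.
-- symbols[count] is pyGet?; its none case (Python's IndexError) is excluded by Pre_,
-- the .getD ' ' only makes the port total there.
def toMinValueLoop : List Char → List Char → Int → PySem.Dict Char Char → List Char
  | [], value, _, _ => value
  | c :: rest, value, count, used =>
    match used.get? c with
    | some v => toMinValueLoop rest (value ++ [v]) count used
    | none =>
      let s := (PySem.List.pyGet? pvSymbolsA count).getD ' '
      toMinValueLoop rest (value ++ [s]) (count + 1) (used.insert c s)

def toMinValue (word : String) (base : Int) : String :=
  String.mk (toMinValueLoop word.toList [] 0 PySem.Dict.empty)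

-- ===== PORT B =====
def pvSymbolsB : List Char := "1023456789ABCDEFGHIJKLMNOPQRSTUVWXYZ".toList

-- B: per character c, the digit is symbols[len(set(word[:word.index(c)]))].
-- word.index(c) on a 1-char needle is the first occurrence index = PySem.List.index?
-- (always some here since c comes from word; .getD 0 totalizes the port);
-- word[:i] is PySem.List.slice none (some i); set(...) is PySem.Set.ofList;
-- symbols[j] is pyGet? (IndexError for >36 distinct chars is excluded by Pre_, .getD ' ' totalizes).
def toMinValue_alt (word : String) (base : Int) : String :=
  String.mk (word.toList.map (fun c =>
    (PySem.List.pyGet? pvSymbolsB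
      (((PySem.Set.ofList (PySem.List.slice word.toList none
          (some (((PySem.List.index? word.toList c).getD 0 : Nat) : Int)))).length : Int))).getD ' '))

-- ===== PRECONDITION & SPEC =====
-- Pre_ excludes words with more than 36 distinct characters: there Python A raises IndexError
-- (symbols[count] out of range), and Python B raises the same IndexError (symbols[36]).
def Pre_toMinValue (word : String) (base : Int) : Prop :=
  (PySem.List.dedup word.toList).length ≤ 36
instance (word : String) (base : Int) : Decidable (Pre_toMinValue word base) := by
  unfold Pre_toMinValue; infer_instance
def pvWitness_toMinValue : String × Int := ("hello world", 7)

def Spec_toMinValue (word : String) (base : Int) (out : String) : Prop := out = toMinValue_alt word base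
instance (word : String) (base : Int) (out : String) : Decidable (Spec_toMinValue word base out) := by unfold Spec_toMinValue; infer_instance

-- ===== CLAIM (what is proved, stated in full; the proofs are below) =====
def Claim_equal_toMinValue : Prop := ∀ (word : String) (base : Int), Dom_toMinValue word base → Pre_toMinValue word base → Spec_toMinValue word base (toMinValue word base)

-- ===== LEMMAS AND PROOFS =====

-- the symbol emitted for the k-th fresh character (both ports' total form of symbols[k])
def pvSymAt (k : Nat) : Char := (pvSymbolsA[k]?).getD ' '

-- A's loop invariant: if usedChars maps exactly the distinct characters seen so far (list d, in
-- first-appearance order) to their symbols, the loop appends one symbol per character, indexed by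
-- the character's position in the dedup of (seen ++ remaining).
theorem pvLoopA_eq (cs : List Char) : ∀ (value d : List Char) (used : PySem.Dict Char Char),
    used.keys = d → d.Nodup →
    (∀ c ∈ d, used.get? c = some (pvSymAt (d.idxOf c))) →
    toMinValueLoop cs value (d.length : Int) used
      = value ++ cs.map (fun c => pvSymAt ((PySem.Set.update d cs).idxOf c)) := by
  induction cs with
  | nil => intro value d used _ _ _; simp [toMinValueLoop]
  | cons c rest ih =>
    intro value d used hk hnd hget
    have hidx_upd : ∀ (e : List Char) (x : Char), x ∈ e → (PySem.Set.update e rest).idxOf x = e.idxOf x := by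
      intro e x hx
      rw [PySem.Set.update_eq_append_filter, List.idxOf_append_of_mem hx]
    by_cases hc : c ∈ d
    · have hsome := hget c hc
      simp only [toMinValueLoop, hsome]
      rw [ih (value ++ [pvSymAt (d.idxOf c)]) d used hk hnd hget]
      rw [List.map_cons, PySem.Set.update_cons, PySem.Set.add_of_mem hc, hidx_upd d c hc]
      simp
    · have hnone : used.get? c = none := by
        rw [PySem.Dict.get?_eq_none_iff_not_mem_keys, hk]; exact hc
      have hcont : used.contains c = false := by
        rw [PySem.Dict.contains_eq_isSome_get?, hnone]; rfl
      have hs : (PySem.List.pyGet? pvSymbolsA (d.length : Int)).getD ' ' = pvSymAt d.length := by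
        simp [pvSymAt, PySem.List.pyGet?_natCast]
      simp only [toMinValueLoop, hnone, hs]
      have hk' : (used.insert c (pvSymAt d.length)).keys = d ++ [c] := by
        rw [PySem.Dict.keys_insert_of_not_contains used (pvSymAt d.length) hcont, hk]
      have hnd' : (d ++ [c]).Nodup := by
        refine hnd.append (List.nodup_singleton c) ?_
        intro a ha hac
        rw [List.mem_singleton] at hac
        exact hc (hac ▸ ha)
      have hlen : ((d ++ [c]).length : Int) = (d.length : Int) + 1 := by simp
      have hget' : ∀ x ∈ d ++ [c], (used.insert c (pvSymAt d.length)).get? x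
          = some (pvSymAt ((d ++ [c]).idxOf x)) := by
        intro x hx
        rw [PySem.Dict.get?_insert]
        by_cases hxc : x = c
        · subst hxc; simp [List.idxOf_append, hc]
        · have hxd : x ∈ d := by
            rcases List.mem_append.1 hx with h | h
            · exact h
            · simp at h; exact absurd h hxc
          rw [if_neg hxc, hget x hxd, List.idxOf_append_of_mem hxd]
      rw [← hlen, ih (value ++ [pvSymAt d.length]) (d ++ [c]) _ hk' hnd' hget']
      rw [List.map_cons, PySem.Set.update_cons, PySem.Set.add_of_not_mem hc]
      have hcmem : c ∈ d ++ [c] := by simp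
      rw [hidx_upd (d ++ [c]) c hcmem]
      have : (d ++ [c]).idxOf c = d.length := by simp [List.idxOf_append, hc]
      rw [this]
      simp

-- a character never occurs in the prefix of the list before its own first occurrence
theorem pvNotMemTakeIdxOf (c : Char) (l : List Char) : c ∉ l.take (l.idxOf c) := by
  induction l with
  | nil => simp
  | cons a t ih =>
    by_cases h : a = c
    · subst h; simp
    · rw [List.idxOf_cons_ne _ h]
      simp only [List.take_succ_cons, List.mem_cons, not_or]
      exact ⟨fun hc => h hc.symm, ih⟩

-- B's rank formula: a character's index in the ordered dedup of l equals the number of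
-- distinct characters in the prefix of l before its first occurrence.
theorem pvRankEq (c : Char) (l : List Char) (hc : c ∈ l) :
    (PySem.Set.ofList l).idxOf c = (PySem.Set.ofList (l.take (l.idxOf c))).length := by
  set k := l.idxOf c with hkdef
  have hkl : k < l.length := List.idxOf_lt_length_of_mem hc
  have hdec : l = l.take k ++ c :: l.drop (k + 1) := by
    conv_lhs => rw [← List.take_append_drop k l]
    congr 1
    rw [← List.getElem_cons_drop hkl, List.getElem_idxOf hkl]
  have hcpre : c ∉ PySem.Set.ofList (l.take k) := fun h =>
    pvNotMemTakeIdxOf c l ((PySem.Set.mem_ofList _ _).1 h)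
  have h1 : PySem.Set.ofList l
      = PySem.Set.update (PySem.Set.ofList (l.take k) ++ [c]) (l.drop (k + 1)) := by
    conv_lhs => rw [hdec]
    rw [PySem.Set.ofList_append, PySem.Set.update_cons, PySem.Set.add_of_not_mem hcpre]
  have hmem : c ∈ PySem.Set.ofList (l.take k) ++ [c] := by simp
  rw [h1, PySem.Set.update_eq_append_filter, List.idxOf_append_of_mem hmem]
  simp [List.idxOf_append, hcpre]

-- ===== VERDICT (by name: the statement is the Claim_ definition above) =====
theorem toMinValue_spec : Claim_equal_toMinValue := by
  intro word base _ _
  unfold Spec_toMinValue toMinValue toMinValue_alt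
  have hA := pvLoopA_eq word.toList [] [] PySem.Dict.empty rfl List.nodup_nil (by intro c hc; cases hc)
  simp only [List.length_nil, Nat.cast_zero] at hA
  rw [hA, PySem.Set.update_nil_left]
  simp only [List.nil_append]
  congr 1
  refine List.map_congr_left ?_
  intro c hcw
  have hidx : (PySem.List.index? word.toList c).getD 0 = word.toList.idxOf c := by
    rw [PySem.List.index?_eq_idxOf?]
    rw [List.idxOf_eq_getD_idxOf? c word.toList]
    cases h : word.toList.idxOf? c with
    | none => exact absurd ((List.isSome_idxOf?).2 hcw) (by simp [h])
    | some k => rfl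
  rw [hidx, PySem.List.slice_to_natCast, pvRankEq c word.toList hcw]
  simp [pvSymAt, PySem.List.pyGet?_natCast, pvSymbolsB, pvSymbolsA]
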